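-- pv_equiv track=rewrite | github.com/shawnrobinson226-source/sapphire-system | core/system_v1/service.py | _derive_task_state_from_steps
-- ===== SOURCE A (Python) =====
-- def _derive_task_state_from_steps(steps):
--     statuses = [step.get("status", "pending") for step in steps]
--     if statuses and all(status == "complete" for status in statuses):
--         return "complete"
--     if any(status == "active" for status in statuses):
--         return "active"
--     if any(status == "blocked" for status in statuses) and not any(status == "active" for status in statuses):
--         return "blocked"
--     return "pending"
-- ===== SOURCE B (Python) =====
-- def _derive_task_state_from_steps(steps):
--     saw_any = False
--     all_complete = True
--     any_active = False
--     any_blocked = False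
--     for step in steps:
--         status = step.get("status", "pending")
--         saw_any = True
--         if status != "complete":
--             all_complete = False
--         if status == "active":
--             any_active = True
--         if status == "blocked":
--             any_blocked = True
--     if saw_any and all_complete:
--         return "complete"
--     if any_active:
--         return "active"
--     if any_blocked:
--         return "blocked"
--     return "pending"
-- ===== Notes on version B (the rewrite author's own statement) =====
-- stated objective: alternative
-- what changed: Replaces the materialised status list and four separate all/any scans with a single pass over the steps maintaining four boolean flags, deciding the state from the flags afterwards.
import Mathlib
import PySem

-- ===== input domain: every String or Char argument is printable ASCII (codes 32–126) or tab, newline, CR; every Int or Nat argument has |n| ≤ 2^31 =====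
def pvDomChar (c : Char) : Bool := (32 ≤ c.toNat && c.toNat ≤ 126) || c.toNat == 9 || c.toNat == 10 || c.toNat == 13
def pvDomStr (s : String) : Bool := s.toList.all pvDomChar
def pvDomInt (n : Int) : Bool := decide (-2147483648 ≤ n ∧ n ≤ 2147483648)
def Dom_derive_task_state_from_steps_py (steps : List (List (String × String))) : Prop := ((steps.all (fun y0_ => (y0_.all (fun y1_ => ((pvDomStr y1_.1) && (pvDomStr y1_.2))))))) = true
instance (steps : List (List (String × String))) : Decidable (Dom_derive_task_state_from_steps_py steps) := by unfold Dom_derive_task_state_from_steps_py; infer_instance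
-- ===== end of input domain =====

-- B replaces the status list and A's repeated all/any scans with a single flag-accumulating pass (alternative decomposition; same asymptotic cost).


-- ===== PORT A =====
def derive_task_state_from_steps_py (steps : List (List (String × String))) : String :=
  let statuses := steps.map (fun step => PySem.Dict.getD (PySem.Dict.mk step) "status" "pending")
  if !statuses.isEmpty && statuses.all (fun s => s == "complete") then "complete"
  else if statuses.any (fun s => s == "active") then "active"
  else if statuses.any (fun s => s == "blocked") && !(statuses.any (fun s => s == "active")) then "blocked"
  else "pending"

-- ===== PORT B =====
-- the single pass: state = (saw_any, all_complete, any_active, any_blocked)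
def derive_task_state_from_steps_py_alt_loop (steps : List (List (String × String)))
    (st : Bool × Bool × Bool × Bool) : Bool × Bool × Bool × Bool :=
  steps.foldl
    (fun st step =>
      let status := PySem.Dict.getD (PySem.Dict.mk step) "status" "pending"
      (true,
       (if status != "complete" then false else st.2.1),
       (if status == "active" then true else st.2.2.1),
       (if status == "blocked" then true else st.2.2.2)))
    st

def derive_task_state_from_steps_py_alt (steps : List (List (String × String))) : String :=
  let st := derive_task_state_from_steps_py_alt_loop steps (false, true, false, false)
  if st.1 && st.2.1 then "complete"
  else if st.2.2.1 then "active"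
  else if st.2.2.2 then "blocked"
  else "pending"

-- ===== PRECONDITION & SPEC =====
def Spec_derive_task_state_from_steps_py (steps : List (List (String × String))) (out : String) : Prop := out = derive_task_state_from_steps_py_alt steps
instance (steps : List (List (String × String))) (out : String) : Decidable (Spec_derive_task_state_from_steps_py steps out) := by unfold Spec_derive_task_state_from_steps_py; infer_instance

-- ===== CLAIM (what is proved, stated in full; the proofs are below) =====
def Claim_equal_derive_task_state_from_steps_py : Prop := ∀ (steps : List (List (String × String))), Dom_derive_task_state_from_steps_py steps → Spec_derive_task_state_from_steps_py steps (derive_task_state_from_steps_py steps)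

-- ===== LEMMAS AND PROOFS =====

-- the loop's flags are exactly nonemptiness / all-complete / any-active / any-blocked of the status list
theorem alt_loop_eq (steps : List (List (String × String))) (sa ac aa ab : Bool) :
    derive_task_state_from_steps_py_alt_loop steps (sa, ac, aa, ab) =
      (sa || !steps.isEmpty,
       ac && (steps.map (fun step => PySem.Dict.getD (PySem.Dict.mk step) "status" "pending")).all (fun s => s == "complete"),
       aa || (steps.map (fun step => PySem.Dict.getD (PySem.Dict.mk step) "status" "pending")).any (fun s => s == "active"),
       ab || (steps.map (fun step => PySem.Dict.getD (PySem.Dict.mk step) "status" "pending")).any (fun s => s == "blocked")) := by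
  induction steps generalizing sa ac aa ab with
  | nil => simp [derive_task_state_from_steps_py_alt_loop]
  | cons h t ih =>
      simp only [derive_task_state_from_steps_py_alt_loop, List.foldl_cons] at *
      rw [ih]
      simp only [List.map_cons, List.all_cons, List.any_cons, List.isEmpty_cons]
      cases hc : (PySem.Dict.getD (PySem.Dict.mk h) "status" "pending" == "complete") <;>
      cases ha : (PySem.Dict.getD (PySem.Dict.mk h) "status" "pending" == "active") <;>
      cases hb : (PySem.Dict.getD (PySem.Dict.mk h) "status" "pending" == "blocked") <;>
        simp_all [bne]

-- ===== VERDICT (by name: the statement is the Claim_ definition above) ====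
theorem derive_task_state_from_steps_py_spec : Claim_equal_derive_task_state_from_steps_py := by
  intro steps _
  unfold Spec_derive_task_state_from_steps_py derive_task_state_from_steps_py derive_task_state_from_steps_py_alt
  rw [alt_loop_eq]
  simp only [Bool.false_or, Bool.true_and]
  cases he : steps.isEmpty <;>
  cases hall : (steps.map (fun step => PySem.Dict.getD (PySem.Dict.mk step) "status" "pending")).all (fun s => s == "complete") <;>
  cases ha : (steps.map (fun step => PySem.Dict.getD (PySem.Dict.mk step) "status" "pending")).any (fun s => s == "active") <;>
  cases hb : (steps.map (fun step => PySem.Dict.getD (PySem.Dict.mk step) "status" "pending")).any (fun s => s == "blocked") <;>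
    simp_all
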